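-- pv_equiv track=rewrite | github.com/Keenan-Penner/IDLA-Scripts | aggregateVisualization/multi-source/2D/forest.py | dfs
-- ===== SOURCE A (Python) =====
-- def connected(edge1, edge2):
--         point11 = edge1[0]
--         point12 = edge1[1]
--         point21 = edge2[0]
--         point22 = edge2[1]
--
--         return point11 == point21 or point11 == point22 or point12 == point21 or point12 == point22
--
-- def dfs(root, forest, visited):
--     # Perform Depth-First Search (DFS) to find all edges connected to the root
--     stack = [root]
--     connected_edges = [root]
--     visited.add(tuple(map(tuple, root)))  # Convert edge to tuple of tuples to make it hashable
--     while stack: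
--         edge = stack.pop()
--         for other_edge in forest:
--             if tuple(map(tuple, other_edge)) not in visited and connected(edge, other_edge):
--                 visited.add(tuple(map(tuple, other_edge)))  # Convert edge to tuple of tuples
--                 connected_edges.append(other_edge)
--                 stack.append(other_edge)
--     return connected_edges
-- ===== SOURCE B (Python) =====
-- def dfs(root, forest, visited):
--     # Dedup the forest against `visited` once, then DFS over a shrinking worklist:
--     # each pop partitions the remaining edges into connected / not-yet-reachable,
--     # so no visited-membership test is needed inside the loop.
--     visited.add(tuple(map(tuple, root)))
--     seen = set(visited)
--     remaining = []
--     for e in forest: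
--         t = tuple(map(tuple, e))
--         if t not in seen:
--             seen.add(t)
--             remaining.append(e)
--     connected_edges = [root]
--     stack = [root]
--     while stack:
--         edge = stack.pop()
--         p = edge[0]
--         q = edge[1]
--         conn = [e for e in remaining if e[0] == p or e[0] == q or e[1] == p or e[1] == q]
--         rest = [e for e in remaining if not (e[0] == p or e[0] == q or e[1] == p or e[1] == q)]
--         for e in conn:
--             visited.add(tuple(map(tuple, e)))
--         connected_edges += conn
--         stack += conn
--         remaining = rest
--     return connected_edges
-- ===== Notes on version B (the rewrite author's own statement) =====
-- stated objective: alternative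
-- what changed: B deduplicates the forest against the visited set once up front and then runs the DFS over a shrinking worklist that each pop partitions into connected/rest, so the loop needs no visited-set membership tests and scans ever fewer edges, instead of A's rescan of the whole forest with set lookups on every pop.
-- outside the precondition, e.g. on dfs([], [], set()): A returns [[]], B raises IndexError
import Mathlib
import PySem

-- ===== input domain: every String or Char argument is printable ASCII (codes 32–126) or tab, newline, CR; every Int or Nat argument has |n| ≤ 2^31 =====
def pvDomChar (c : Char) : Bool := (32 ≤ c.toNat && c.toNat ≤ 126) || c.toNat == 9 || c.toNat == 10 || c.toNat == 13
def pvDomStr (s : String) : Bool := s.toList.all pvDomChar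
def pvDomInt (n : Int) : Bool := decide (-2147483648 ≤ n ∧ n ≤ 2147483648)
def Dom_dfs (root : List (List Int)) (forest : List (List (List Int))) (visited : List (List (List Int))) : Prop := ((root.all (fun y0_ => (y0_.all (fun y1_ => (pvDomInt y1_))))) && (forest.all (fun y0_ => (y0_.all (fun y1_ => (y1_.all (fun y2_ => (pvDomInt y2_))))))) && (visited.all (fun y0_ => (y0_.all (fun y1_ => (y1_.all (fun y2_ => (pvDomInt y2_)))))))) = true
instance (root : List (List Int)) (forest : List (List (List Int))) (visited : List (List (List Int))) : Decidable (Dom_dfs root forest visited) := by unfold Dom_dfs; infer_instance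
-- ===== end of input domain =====

-- B replaces the per-pop scan of the whole forest plus visited-set membership tests by a
-- once-deduplicated worklist that each pop PARTITIONS into connected / rest, shrinking it
-- (objective: alternative).  Both A and B mutate `visited` in place identically in Python;
-- the equivalence proved here is about the RETURN value (the ports take `visited` as a value).

-- ===== PORT A =====
def connectedA (edge1 edge2 : List (List Int)) : Bool :=
  let point11 := PySem.List.pyGetD edge1 0 []
  let point12 := PySem.List.pyGetD edge1 1 []
  let point21 := PySem.List.pyGetD edge2 0 []
  let point22 := PySem.List.pyGetD edge2 1 []
  point11 == point21 || point11 == point22 || point12 == point21 || point12 == point22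

-- the inner `for other_edge in forest: …` pass, threading (visited, connected_edges, stack)
def dfsScan (edge : List (List Int)) :
    List (List (List Int)) → PySem.Set (List (List Int)) → List (List (List Int)) →
    List (List (List Int)) →
    PySem.Set (List (List Int)) × List (List (List Int)) × List (List (List Int))
  | [], visited, acc, stack => (visited, acc, stack)
  | o :: fs, visited, acc, stack =>
    if !(PySem.Set.contains visited o) && connectedA edge o then
      dfsScan edge fs (PySem.Set.add visited o) (acc ++ [o]) (o :: stack)
    else
      dfsScan edge fs visited acc stack

-- the `while stack:` loop; the stack's top is the list head; the fuel `forest.length + 2`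
-- is a totality guard only (each push beyond the root marks a distinct forest edge visited,
-- so at most forest.length + 1 pops ever happen and the fuel is never exhausted)
def dfsLoop (forest : List (List (List Int))) :
    Nat → List (List (List Int)) → PySem.Set (List (List Int)) → List (List (List Int)) →
    List (List (List Int))
  | 0, _, _, acc => acc
  | _ + 1, [], _, acc => acc
  | n + 1, edge :: st, visited, acc =>
    let r := dfsScan edge forest visited acc st
    dfsLoop forest n r.2.2 r.1 r.2.1

def dfs (root : List (List Int)) (forest : List (List (List Int))) (visited : List (List (List Int))) : List (List (List Int)) :=
  dfsLoop forest (forest.length + 2) [root] (PySem.Set.add visited root) [root]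

-- ===== PORT B =====
def connB (p q : List Int) (e : List (List Int)) : Bool :=
  PySem.List.pyGetD e 0 [] == p || PySem.List.pyGetD e 0 [] == q ||
  PySem.List.pyGetD e 1 [] == p || PySem.List.pyGetD e 1 [] == q

-- Source B's `seen`/`remaining` building loop: forest deduplicated and filtered against seen
def buildRemaining :
    List (List (List Int)) → PySem.Set (List (List Int)) → List (List (List Int))
  | [], _ => []
  | e :: fs, seen =>
    if PySem.Set.contains seen e then buildRemaining fs seen
    else e :: buildRemaining fs (PySem.Set.add seen e)

-- Source B's `while stack:` loop over the shrinking worklist (same fuel guard as port A)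
def altLoop :
    Nat → List (List (List Int)) → List (List (List Int)) → List (List (List Int)) →
    List (List (List Int))
  | 0, _, acc, _ => acc
  | _ + 1, [], acc, _ => acc
  | n + 1, edge :: st, acc, remaining =>
    let p := PySem.List.pyGetD edge 0 []
    let q := PySem.List.pyGetD edge 1 []
    let conn := remaining.filter (fun e => connB p q e)
    let rest := remaining.filter (fun e => !(connB p q e))
    altLoop n (conn.reverse ++ st) (acc ++ conn) rest

def dfs_alt (root : List (List Int)) (forest : List (List (List Int))) (visited : List (List (List Int))) : List (List (List Int)) :=
  -- python: visited.add(root); seen = set(visited)  (a copy of a set is the same value)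
  let seen := PySem.Set.add visited root
  let remaining := buildRemaining forest seen
  altLoop (forest.length + 2) [root] [root] remaining

-- ===== PRECONDITION & SPEC =====
-- Pre_ excludes the inputs on which `connected` would read a missing edge[0]/edge[1]
-- (IndexError in A): every forest edge that is not already visited (and is not the root,
-- which is marked visited immediately) must have at least two points, as must the root;
-- a sub-two-point root slips through A only when the forest holds no unvisited edge at all
-- (no `connected` call happens), and there B naturally raises IndexError instead.
def Pre_dfs (root : List (List Int)) (forest : List (List (List Int))) (visited : List (List (List Int))) : Prop :=
  2 ≤ root.length ∧ ∀ e ∈ forest, 2 ≤ e.length ∨ e ∈ visited ∨ e = root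
instance (root : List (List Int)) (forest : List (List (List Int))) (visited : List (List (List Int))) : Decidable (Pre_dfs root forest visited) := by unfold Pre_dfs; infer_instance

def pvWitness_dfs : List (List Int) × List (List (List Int)) × List (List (List Int)) :=
  ([[0, 0], [1, 0]], [[[1, 0], [2, 0]], [[5, 5], [6, 5]]], [])

def Spec_dfs (root : List (List Int)) (forest : List (List (List Int))) (visited : List (List (List Int))) (out : List (List (List Int))) : Prop := out = dfs_alt root forest visited
instance (root : List (List Int)) (forest : List (List (List Int))) (visited : List (List (List Int))) (out : List (List (List Int))) : Decidable (Spec_dfs root forest visited out) := by unfold Spec_dfs; infer_instance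

-- ===== CLAIM (what is proved, stated in full; the proofs are below) =====
def Claim_equal_dfs : Prop := ∀ (root : List (List Int)) (forest : List (List (List Int))) (visited : List (List (List Int))), Dom_dfs root forest visited → Pre_dfs root forest visited → Spec_dfs root forest visited (dfs root forest visited)

-- ===== LEMMAS AND PROOFS =====

-- membership of a set after `add`, as a boolean
theorem contains_add (s : PySem.Set (List (List Int))) (e x : List (List Int)) :
    PySem.Set.contains (PySem.Set.add s e) x = (PySem.Set.contains s x || x == e) := by
  rw [Bool.eq_iff_iff]
  simp [PySem.Set.add, PySem.Set.contains]
  by_cases h : e ∈ s <;> by_cases hx : x = e <;> simp [h, hx]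

-- `buildRemaining` with the seen-set abstracted to its membership predicate
def remP : List (List (List Int)) → (List (List Int) → Bool) → List (List (List Int))
  | [], _ => []
  | e :: fs, m =>
    if m e then remP fs m else e :: remP fs (fun x => m x || x == e)

theorem remP_congr (fs : List (List (List Int))) :
    ∀ (m m' : List (List Int) → Bool), (∀ x, m x = m' x) → remP fs m = remP fs m' := by
  induction fs with
  | nil => intro m m' _; rfl
  | cons e fs ih =>
    intro m m' h
    simp only [remP, h e]
    split
    · exact ih _ _ h
    · exact congrArg _ (ih _ _ fun x => by rw [h x])

theorem buildRemaining_eq_remP (fs : List (List (List Int))) :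
    ∀ (s : PySem.Set (List (List Int))),
      buildRemaining fs s = remP fs (fun x => PySem.Set.contains s x) := by
  induction fs with
  | nil => intro s; rfl
  | cons e fs ih =>
    intro s
    simp only [buildRemaining, remP]
    split
    · exact ih s
    · exact congrArg _ ((ih _).trans (remP_congr _ _ _ fun x => contains_add s e x))

-- marking extra elements seen = filtering them out of the worklist
theorem remP_or (fs : List (List (List Int))) :
    ∀ (m d : List (List Int) → Bool),
      remP fs (fun x => m x || d x) = (remP fs m).filter (fun x => !(d x)) := by
  induction fs with
  | nil => intro m d; rfl
  | cons e fs ih =>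
    intro m d
    by_cases hm : m e = true
    · have h1 : remP (e :: fs) (fun x => m x || d x) = remP fs (fun x => m x || d x) := by
        simp [remP, hm]
      have h2 : remP (e :: fs) m = remP fs m := by simp [remP, hm]
      rw [h1, h2]; exact ih m d
    · by_cases hd : d e = true
      · have h1 : remP (e :: fs) (fun x => m x || d x) = remP fs (fun x => m x || d x) := by
          simp [remP, hm, hd]
        have h2 : (remP (e :: fs) m).filter (fun x => !(d x))
            = (remP fs (fun x => m x || x == e)).filter (fun x => !(d x)) := by
          simp [remP, hm, hd]
        rw [h1, h2, ← ih (fun x => m x || x == e) d]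
        exact remP_congr fs _ _ fun x => by
          by_cases hx : x = e
          · subst hx; simp [hd]
          · have hbe : (x == e) = false := by simp [hx]
            rw [hbe, Bool.or_false]
      · have h1 : remP (e :: fs) (fun x => m x || d x)
            = e :: remP fs (fun x => (m x || d x) || x == e) := by
          simp [remP, hm, hd]
        have h2 : (remP (e :: fs) m).filter (fun x => !(d x))
            = e :: (remP fs (fun x => m x || x == e)).filter (fun x => !(d x)) := by
          simp [remP, hm, hd]
        rw [h1, h2, ← ih (fun x => m x || x == e) d]
        exact congrArg _ (remP_congr fs _ _ fun x => by cases m x <;> cases d x <;> simp)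

-- marking an element the scan does NOT take does not change what the scan takes
theorem remP_filter_add (C : List (List Int) → Bool) (e : List (List Int)) (hC : C e = false)
    (fs : List (List (List Int))) :
    ∀ (m : List (List Int) → Bool),
      (remP fs (fun x => m x || x == e)).filter C = (remP fs m).filter C := by
  induction fs with
  | nil => intro m; rfl
  | cons f fs ih =>
    intro m
    by_cases hm : m f = true
    · simp only [remP, hm, Bool.true_or, if_true]
      exact ih m
    · by_cases hfe : f = e
      · subst hfe
        have h1 : remP (f :: fs) (fun x => m x || x == f) = remP fs (fun x => m x || x == f) := by
          simp [remP, hm]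
        have h2 : remP (f :: fs) m = f :: remP fs (fun x => m x || x == f) := by
          simp [remP, hm]
        rw [h1, h2, List.filter_cons_of_neg (by simp [hC])]
      · have h1 : remP (f :: fs) (fun x => m x || x == e)
            = f :: remP fs (fun x => (m x || x == e) || x == f) := by
          simp [remP, hm, beq_iff_eq, hfe]
        have h2 : remP (f :: fs) m = f :: remP fs (fun x => m x || x == f) := by
          simp [remP, hm]
        rw [h1, h2, List.filter_cons, List.filter_cons,
            remP_congr fs (fun x => (m x || x == e) || x == f)
              (fun x => (m x || x == f) || x == e)
              (fun x => by cases m x <;> cases hxe : (x == e) <;> simp [hxe]),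
            ih (fun x => m x || x == f)]

-- the inner pass takes exactly the connected edges of the current worklist, in order
theorem dfsScan_spec (edge : List (List Int)) (fs : List (List (List Int))) :
    ∀ (vis : PySem.Set (List (List Int))) (acc st : List (List (List Int))),
      (dfsScan edge fs vis acc st).2.1 =
        acc ++ (remP fs (fun x => PySem.Set.contains vis x)).filter (connectedA edge) ∧
      (dfsScan edge fs vis acc st).2.2 =
        ((remP fs (fun x => PySem.Set.contains vis x)).filter (connectedA edge)).reverse ++ st ∧
      ∀ x, PySem.Set.contains (dfsScan edge fs vis acc st).1 x =
        (PySem.Set.contains vis x ||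
          decide (x ∈ (remP fs (fun y => PySem.Set.contains vis y)).filter (connectedA edge))) := by
  induction fs with
  | nil =>
    intro vis acc st
    refine ⟨by simp [dfsScan, remP], by simp [dfsScan, remP], fun x => by simp [dfsScan, remP]⟩
  | cons e fs ih =>
    intro vis acc st
    by_cases hv : PySem.Set.contains vis e = true
    · have hA : dfsScan edge (e :: fs) vis acc st = dfsScan edge fs vis acc st := by
        simp only [dfsScan, hv, Bool.not_true, Bool.false_and]
        rfl
      have hR : remP (e :: fs) (fun x => PySem.Set.contains vis x)
          = remP fs (fun x => PySem.Set.contains vis x) := by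
        simp only [remP, hv, if_true]
      rw [hA, hR]
      exact ih vis acc st
    · have hR : remP (e :: fs) (fun x => PySem.Set.contains vis x)
          = e :: remP fs (fun x => PySem.Set.contains vis x || x == e) := by
        simp only [remP, hv, if_false, Bool.false_eq_true]
      have hrw : remP fs (fun x => PySem.Set.contains (PySem.Set.add vis e) x)
          = remP fs (fun x => PySem.Set.contains vis x || x == e) :=
        remP_congr fs _ _ fun x => contains_add vis e x
      by_cases hc : connectedA edge e = true
      · have hA : dfsScan edge (e :: fs) vis acc st
            = dfsScan edge fs (PySem.Set.add vis e) (acc ++ [e]) (e :: st) := by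
          simp only [dfsScan, hv, hc, Bool.not_false, Bool.true_and, if_true]
        have hF : (remP (e :: fs) (fun x => PySem.Set.contains vis x)).filter (connectedA edge)
            = e :: (remP fs (fun x => PySem.Set.contains vis x || x == e)).filter
                (connectedA edge) := by
          rw [hR, List.filter_cons_of_pos hc]
        obtain ⟨h1, h2, h3⟩ := ih (PySem.Set.add vis e) (acc ++ [e]) (e :: st)
        rw [hrw] at h1 h2 h3
        refine ⟨by rw [hA, h1, hF]; simp, by rw [hA, h2, hF]; simp, fun x => ?_⟩
        rw [hA, h3 x, contains_add, hF]
        by_cases hx : x = e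
        · subst hx; simp
        · have hbe : (x == e) = false := by simp [hx]
          simp [hbe, hx]
      · have hA : dfsScan edge (e :: fs) vis acc st = dfsScan edge fs vis acc st := by
          simp only [dfsScan, hv, hc, Bool.not_false, Bool.and_false]
          rfl
        have hF : (remP (e :: fs) (fun x => PySem.Set.contains vis x)).filter (connectedA edge)
            = (remP fs (fun x => PySem.Set.contains vis x)).filter (connectedA edge) := by
          rw [hR, List.filter_cons_of_neg (by simp [hc]),
              remP_filter_add (connectedA edge) e (by simp [hc]) fs]
        rw [hA, hF]
        exact ih vis acc st

-- A's connectivity test against a popped edge = B's test against its two endpoints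
theorem beq4_comm (a b c d : List Int) :
    (c == a || c == b || d == a || d == b) = (a == c || a == d || b == c || b == d) := by
  rw [Bool.eq_iff_iff]; simp only [Bool.or_eq_true, beq_iff_eq]
  constructor <;> rintro (((h | h) | h) | h) <;> subst h <;> simp

theorem conn_eq (edge x : List (List Int)) :
    connB (PySem.List.pyGetD edge 0 []) (PySem.List.pyGetD edge 1 []) x = connectedA edge x := by
  simp only [connB, connectedA]
  exact beq4_comm _ _ _ _

-- main simulation: A's loop with a visited set = B's loop over the residual worklist
theorem loop_eq (forest : List (List (List Int))) :
    ∀ (n : Nat) (st : List (List (List Int))) (vis : PySem.Set (List (List Int)))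
      (acc : List (List (List Int))),
      dfsLoop forest n st vis acc =
        altLoop n st acc (remP forest (fun x => PySem.Set.contains vis x)) := by
  intro n
  induction n with
  | zero => intro st vis acc; rfl
  | succ n ih =>
    intro st vis acc
    cases st with
    | nil => rfl
    | cons edge st =>
      simp only [dfsLoop, altLoop]
      have hBC : (fun e => connB (PySem.List.pyGetD edge 0 []) (PySem.List.pyGetD edge 1 []) e)
          = connectedA edge := funext fun e => conn_eq edge e
      obtain ⟨h1, h2, h3⟩ := dfsScan_spec edge forest vis acc st
      rw [h1, h2, ih]
      simp only [hBC]
      congr 1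
      rw [remP_congr forest _ _ h3, remP_or forest]
      refine List.filter_congr fun x hx => ?_
      have hmem : x ∈ (remP forest (fun y => PySem.Set.contains vis y)).filter
          (connectedA edge) ↔ connectedA edge x = true := by
        rw [List.mem_filter]
        exact ⟨fun h => h.2, fun h => ⟨hx, h⟩⟩
      rw [decide_eq_decide.mpr hmem, Bool.decide_eq_true]

theorem dfs_eq_alt (root : List (List Int)) (forest : List (List (List Int))) (visited : List (List (List Int))) :
    dfs root forest visited = dfs_alt root forest visited := by
  show dfsLoop forest (forest.length + 2) [root] (PySem.Set.add visited root) [root]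
      = altLoop (forest.length + 2) [root] [root]
          (buildRemaining forest (PySem.Set.add visited root))
  rw [buildRemaining_eq_remP]
  exact loop_eq forest (forest.length + 2) [root] (PySem.Set.add visited root) [root]

-- ===== VERDICT (by name: the statement is the Claim_ definition above) =====
theorem dfs_spec : Claim_equal_dfs := by
  intro root forest visited _ _
  unfold Spec_dfs
  exact dfs_eq_alt root forest visited
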